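-- pv_equiv track=rewrite | github.com/ryandeathridge/Agent1 | modal-api/pipeline.py | _keywords_from
-- ===== SOURCE A (Python) =====
-- from typing import Any, Dict, List, Optional, Tuple
--
-- def _keywords_from(text: str) -> List[str]:
--     parts = [text]
--     for sep in [",", "&", "/", "(", ")"]:
--         new_parts = []
--         for p in parts:
--             new_parts.extend(p.split(sep))
--         parts = new_parts
--     return [p.strip() for p in parts if len(p.strip()) > 2]
-- ===== SOURCE B (Python) =====
-- def _keywords_from(text: str) -> list[str]:
--     # Alternative: one left-to-right scan over the characters instead of five re-splitting passes.
--     parts = []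
--     cur = []
--     for ch in text:
--         if ch in ",&/()":
--             parts.append("".join(cur))
--             cur = []
--         else:
--             cur.append(ch)
--     parts.append("".join(cur))
--     return [p.strip() for p in parts if len(p.strip()) > 2]
-- ===== Notes on version B (the rewrite author's own statement) =====
-- stated objective: alternative
-- what changed: Replaces the five sequential re-splitting passes over a growing list of parts by a single left-to-right character scan that cuts the text at any of the five separator characters in one pass; asymptotically one pass instead of five, though CPython's C-level str.split makes A faster in wall-clock.
import Mathlib
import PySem

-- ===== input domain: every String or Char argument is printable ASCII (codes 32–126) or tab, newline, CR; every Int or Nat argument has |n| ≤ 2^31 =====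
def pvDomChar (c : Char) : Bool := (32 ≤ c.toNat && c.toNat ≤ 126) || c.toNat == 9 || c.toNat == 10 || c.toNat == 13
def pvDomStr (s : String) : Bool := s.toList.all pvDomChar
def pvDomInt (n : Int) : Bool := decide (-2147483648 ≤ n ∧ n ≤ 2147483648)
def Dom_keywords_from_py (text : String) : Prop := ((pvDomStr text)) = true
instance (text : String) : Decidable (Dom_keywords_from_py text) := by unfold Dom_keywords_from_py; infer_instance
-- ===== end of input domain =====

-- B replaces A's five sequential re-splitting passes by a single left-to-right character scan (alternative algorithm, same return value).

-- ===== PORT A =====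
-- parts = [text]; for sep in [",","&","/","(",")"]: new_parts = []; for p in parts: new_parts.extend(p.split(sep)); parts = new_parts
-- return [p.strip() for p in parts if len(p.strip()) > 2]
def keywords_from_py (text : String) : List String :=
  let parts := [[','], ['&'], ['/'], ['('], [')']].foldl
    (fun parts sep => parts.foldl (fun np p => np ++ PySem.Chars.splitOn p sep) []) [text.toList]
  (parts.filter (fun p => 2 < PySem.Chars.len (PySem.Chars.strip p))).map
    (fun p => String.ofList (PySem.Chars.strip p))

-- ===== PORT B =====
-- one scan: cut the text at every separator character, then the same strip/filter comprehension
def keywords_from_py_alt (text : String) : List String :=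
  let st := text.toList.foldl
    (fun (st : List (List Char) × List Char) ch =>
      if ch ∈ [',', '&', '/', '(', ')'] then (st.1 ++ [st.2], ([] : List Char))
      else (st.1, st.2 ++ [ch]))
    ([], [])
  let parts := st.1 ++ [st.2]
  (parts.filter (fun p => 2 < PySem.Chars.len (PySem.Chars.strip p))).map
    (fun p => String.ofList (PySem.Chars.strip p))

-- ===== PRECONDITION & SPEC =====
def Spec_keywords_from_py (text : String) (out : List String) : Prop := out = keywords_from_py_alt text
instance (text : String) (out : List String) : Decidable (Spec_keywords_from_py text out) := by unfold Spec_keywords_from_py; infer_instance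

-- ===== CLAIM (what is proved, stated in full; the proofs are below) =====
def Claim_equal_keywords_from_py : Prop := ∀ (text : String), Dom_keywords_from_py text → Spec_keywords_from_py text (keywords_from_py text)

-- ===== LEMMAS AND PROOFS =====

-- splitting a character list at every character that belongs to `seps`
def spl (seps : List Char) : List Char → List (List Char)
  | [] => [[]]
  | c :: cs => if c ∈ seps then [] :: spl seps cs else (spl seps cs).modifyHead (c :: ·)

lemma spl_ne_nil (seps : List Char) : ∀ (cs : List Char), spl seps cs ≠ [] := by
  intro cs
  induction cs with
  | nil => simp [spl]
  | cons c cs ih =>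
    simp only [spl]
    split
    · simp
    · cases h : spl seps cs with
      | nil => exact absurd h ih
      | cons a t => simp [List.modifyHead]

lemma spl_nil : ∀ (cs : List Char), spl [] cs = [cs] := by
  intro cs
  induction cs with
  | nil => rfl
  | cons c cs ih => simp [spl, ih]

lemma go_single (c : Char) : ∀ (fuel : Nat) (l cur : List Char) (acc : List (List Char)),
    l.length < fuel →
    PySem.Chars.splitOn.go [c] fuel l cur acc
      = acc.reverse ++ (spl [c] l).modifyHead (cur.reverse ++ ·) := by
  intro fuel
  induction fuel with
  | zero => intro l cur acc h; omega
  | succ f ih =>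
    intro l cur acc h
    cases l with
    | nil => simp [PySem.Chars.splitOn.go, spl]
    | cons a rest =>
      rw [PySem.Chars.splitOn.go]
      by_cases hc : a = c
      · subst hc
        simp only [List.isPrefixOf, beq_self_eq_true, Bool.true_and, if_true,
          List.length_cons, List.length_nil, List.drop_succ_cons, List.drop_zero]
        rw [ih rest [] (cur.reverse :: acc) (by simpa using Nat.lt_of_succ_lt_succ h)]
        simp only [spl, List.mem_singleton, if_true, List.modifyHead]
        obtain ⟨h1, t1, he⟩ := List.exists_cons_of_ne_nil (spl_ne_nil [a] rest)
        rw [he]; simp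
      · have hp : ([c].isPrefixOf (a :: rest)) = false := by
          simp [List.isPrefixOf]; exact fun h' => absurd h'.symm hc
        simp only [hp, Bool.false_eq_true, if_false]
        rw [ih rest (a :: cur) acc (by simpa using Nat.lt_of_succ_lt_succ h)]
        have hne := spl_ne_nil [c] rest
        obtain ⟨h1, t1, he⟩ := List.exists_cons_of_ne_nil hne
        simp [spl, he, List.modifyHead, hc, List.append_assoc]

lemma splitOn_single (c : Char) (cs : List Char) :
    PySem.Chars.splitOn cs [c] = spl [c] cs := by
  rw [PySem.Chars.splitOn, go_single c (cs.length + 1) cs [] [] (Nat.lt_succ_self _)]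
  obtain ⟨h1, t1, he⟩ := List.exists_cons_of_ne_nil (spl_ne_nil [c] cs)
  simp [he, List.modifyHead]

lemma spl_congr (s1 s2 : List Char) (hm : ∀ a, a ∈ s1 ↔ a ∈ s2) :
    ∀ cs, spl s1 cs = spl s2 cs := by
  intro cs
  induction cs with
  | nil => rfl
  | cons c cs ih =>
    by_cases hc : c ∈ s1
    · simp [spl, hc, (hm c).mp hc, ih]
    · have hc2 : c ∉ s2 := fun h => hc ((hm c).mpr h)
      simp [spl, hc, hc2, ih]

lemma flatMap_spl (c : Char) (seps : List Char) :
    ∀ cs, (spl seps cs).flatMap (spl [c]) = spl (c :: seps) cs := by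
  intro cs
  induction cs with
  | nil => simp [spl]
  | cons a cs ih =>
    by_cases ha : a ∈ seps
    · simp only [spl, ha, if_true, List.mem_cons, or_true, List.flatMap_cons]
      simp [ih]
    · obtain ⟨h1, t1, he⟩ := List.exists_cons_of_ne_nil (spl_ne_nil seps cs)
      simp only [spl, ha, if_false, he, List.modifyHead_cons, List.flatMap_cons]
      by_cases hc : a = c
      · subst hc
        simp only [if_true, List.mem_cons, true_or]
        obtain ⟨h2, t2, he2⟩ := List.exists_cons_of_ne_nil (spl_ne_nil [a] h1)
        rw [← ih, he]
        simp
      · have hm : a ∉ ([c] : List Char) := by simp [hc]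
        have hm2 : a ∉ (c :: seps) := by simp [hc, ha]
        obtain ⟨h2, t2, he2⟩ := List.exists_cons_of_ne_nil (spl_ne_nil [c] h1)
        simp only [hm, if_false, hm2, he2, List.modifyHead_cons, List.cons_append]
        rw [← ih, he]
        simp [he2]

lemma foldl_app {α β : Type} (f : α → List β) :
    ∀ (l : List α) (acc : List β), l.foldl (fun np p => np ++ f p) acc = acc ++ l.flatMap f := by
  intro l
  induction l with
  | nil => simp
  | cons a l ih => intro acc; simp [ih, List.append_assoc]

lemma foldA (cs : List Char) :
    ∀ (ss : List Char) (seps : List Char),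
      (ss.map (fun c => [c])).foldl
        (fun parts sep => parts.foldl (fun np p => np ++ PySem.Chars.splitOn p sep) [])
        (spl seps cs)
      = spl (ss.reverse ++ seps) cs := by
  intro ss
  induction ss with
  | nil => intro seps; simp
  | cons c ss ih =>
    intro seps
    have h1 : (spl seps cs).foldl (fun np p => np ++ PySem.Chars.splitOn p [c]) []
        = spl (c :: seps) cs := by
      rw [foldl_app]
      simp only [List.nil_append]
      rw [show (fun p => PySem.Chars.splitOn p [c]) = spl [c] from funext (fun p => splitOn_single c p)]
      exact flatMap_spl c seps cs
    simp only [List.map_cons, List.foldl_cons, h1, ih (c :: seps), List.reverse_cons,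
      List.append_assoc, List.singleton_append]

lemma foldB : ∀ (cs : List Char) (parts : List (List Char)) (cur : List Char),
    (let r := cs.foldl
        (fun (st : List (List Char) × List Char) ch =>
          if ch ∈ [',', '&', '/', '(', ')'] then (st.1 ++ [st.2], ([] : List Char))
          else (st.1, st.2 ++ [ch]))
        (parts, cur)
     r.1 ++ [r.2]) = parts ++ (spl [',', '&', '/', '(', ')'] cs).modifyHead (cur ++ ·) := by
  intro cs
  induction cs with
  | nil => intro parts cur; simp [spl]
  | cons c cs ih =>
    intro parts cur
    by_cases hc : c ∈ [',', '&', '/', '(', ')']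
    · simp only [List.foldl_cons, hc, if_true]
      rw [ih (parts ++ [cur]) []]
      obtain ⟨h1, t1, he⟩ := List.exists_cons_of_ne_nil (spl_ne_nil [',', '&', '/', '(', ')'] cs)
      simp [spl, hc, he, List.append_assoc]
    · simp only [List.foldl_cons, hc, if_false]
      rw [ih parts (cur ++ [c])]
      obtain ⟨h1, t1, he⟩ := List.exists_cons_of_ne_nil (spl_ne_nil [',', '&', '/', '(', ')'] cs)
      simp [spl, hc, he, List.append_assoc]

lemma parts_eq (text : String) :
    ([[','], ['&'], ['/'], ['('], [')']] : List (List Char)).foldl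
      (fun parts sep => parts.foldl (fun np p => np ++ PySem.Chars.splitOn p sep) []) [text.toList]
    = (let r := text.toList.foldl
        (fun (st : List (List Char) × List Char) ch =>
          if ch ∈ [',', '&', '/', '(', ')'] then (st.1 ++ [st.2], ([] : List Char))
          else (st.1, st.2 ++ [ch]))
        ([], [])
       r.1 ++ [r.2]) := by
  rw [foldB text.toList [] []]
  have h0 : ([[','], ['&'], ['/'], ['('], [')']] : List (List Char))
      = ([',', '&', '/', '(', ')'] : List Char).map (fun c => [c]) := rfl
  have h1 : ([text.toList] : List (List Char)) = spl [] text.toList := (spl_nil _).symm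
  rw [h0, h1, foldA text.toList [',', '&', '/', '(', ')'] []]
  obtain ⟨h2, t2, he⟩ := List.exists_cons_of_ne_nil (spl_ne_nil [',', '&', '/', '(', ')'] text.toList)
  rw [spl_congr ((([',', '&', '/', '(', ')'] : List Char).reverse) ++ [])
      [',', '&', '/', '(', ')'] (by intro a; simp; tauto) text.toList, he]
  simp

-- ===== VERDICT (by name: the statement is the Claim_ definition above) =====
theorem keywords_from_py_spec : Claim_equal_keywords_from_py := by
  intro text _
  unfold Spec_keywords_from_py keywords_from_py keywords_from_py_alt
  rw [parts_eq text]
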